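-- pv_equiv track=rewrite | github.com/berzentine/Wiki-Bio-Generation | data_reader_frequency.py | reverse_pos
-- ===== SOURCE A (Python) =====
-- def reverse_pos(temp_ppos):
--     #print temp_ppos
--     temp_pneg = []
--     current = []
--     for i in range(len(temp_ppos)):
--         if temp_ppos[i]==1:
--             temp_pneg+= current[::-1] # append whatever in buffer, in reverse fashion
--             current = [] # start a new buffer
--             current.append(temp_ppos[i]) # append in buffer
--         else:
--             current.append(temp_ppos[i]) # append in buffer
--
--     temp_pneg+= current[::-1]
--     return temp_pneg
-- ===== SOURCE B (Python) =====
-- def reverse_pos(temp_ppos):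
--     # recursive segment-splitting: peel off one segment (head plus following
--     # non-1 elements), reverse it, and recurse on the rest
--     if not temp_ppos:
--         return []
--     k = 1
--     while k < len(temp_ppos) and temp_ppos[k] != 1:
--         k += 1
--     return temp_ppos[:k][::-1] + reverse_pos(temp_ppos[k:])
-- ===== Notes on version B (the rewrite author's own statement) =====
-- stated objective: alternative
-- what changed: A streams through the list with a buffer that it flushes (reversed) at every 1; B recursively peels off one whole segment at a time by scanning for the next 1, reversing that slice and recursing on the remainder.
import Mathlib
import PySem

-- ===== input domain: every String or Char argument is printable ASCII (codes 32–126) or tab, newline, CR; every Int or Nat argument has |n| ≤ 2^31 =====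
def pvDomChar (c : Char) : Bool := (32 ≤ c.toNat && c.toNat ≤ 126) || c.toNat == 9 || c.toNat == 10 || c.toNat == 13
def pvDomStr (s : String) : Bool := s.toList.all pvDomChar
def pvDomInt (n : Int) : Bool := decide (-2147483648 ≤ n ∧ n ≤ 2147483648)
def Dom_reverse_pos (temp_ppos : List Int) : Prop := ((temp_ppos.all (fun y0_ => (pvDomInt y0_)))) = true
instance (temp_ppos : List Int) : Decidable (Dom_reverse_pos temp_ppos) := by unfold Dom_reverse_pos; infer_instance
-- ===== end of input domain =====

-- B replaces A's streaming buffer-and-flush loop by a recursive segment-splitting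
-- decomposition (find the next 1, reverse the slice, recurse); objective: alternative.


-- ===== PORT A =====
-- for i in range(len(temp_ppos)): flush the buffer (reversed) on a 1, else keep buffering
def reverse_pos (temp_ppos : List Int) : List Int :=
  let st := (PySem.List.pyRange 0 (PySem.List.len temp_ppos)).foldl
    (fun (s : List Int × List Int) i =>
      if PySem.List.pyGetD temp_ppos i 0 = 1 then
        (s.1 ++ s.2.reverse, [PySem.List.pyGetD temp_ppos i 0])
      else
        (s.1, s.2 ++ [PySem.List.pyGetD temp_ppos i 0]))
    ([], [])
  st.1 ++ st.2.reverse

-- ===== PORT B =====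
-- while k < len(xs) and xs[k] != 1: k += 1
def rpFindK (xs : List Int) (k : Nat) : Nat :=
  if k < xs.length ∧ PySem.List.pyGetD xs (k : Int) 0 ≠ 1 then rpFindK xs (k + 1) else k
termination_by xs.length - k

theorem rpFindK_ge (xs : List Int) (k : Nat) : k ≤ rpFindK xs k := by
  unfold rpFindK
  split
  · exact le_trans (Nat.le_succ k) (rpFindK_ge xs (k + 1))
  · exact le_refl k
termination_by xs.length - k

-- xs[:k][::-1] + reverse_pos(xs[k:]) ; port cites rpFindK_ge for termination
def reverse_pos_alt (temp_ppos : List Int) : List Int :=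
  if _h : temp_ppos = [] then [] else
    let k := rpFindK temp_ppos 1
    (PySem.List.slice temp_ppos none (some (k : Int))).reverse ++
      reverse_pos_alt (PySem.List.slice temp_ppos (some (k : Int)) none)
termination_by temp_ppos.length
decreasing_by
  rw [PySem.List.slice_from_natCast]
  have h1 : 1 ≤ rpFindK temp_ppos 1 := rpFindK_ge temp_ppos 1
  have h0 : 0 < temp_ppos.length := List.length_pos_of_ne_nil _h
  simp only [List.length_drop]
  omega

-- ===== PRECONDITION & SPEC =====
def Spec_reverse_pos (temp_ppos : List Int) (out : List Int) : Prop := out = reverse_pos_alt temp_ppos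
instance (temp_ppos : List Int) (out : List Int) : Decidable (Spec_reverse_pos temp_ppos out) := by unfold Spec_reverse_pos; infer_instance

-- ===== CLAIM (what is proved, stated in full; the proofs are below) =====
def Claim_equal_reverse_pos : Prop := ∀ (temp_ppos : List Int), Dom_reverse_pos temp_ppos → Spec_reverse_pos temp_ppos (reverse_pos temp_ppos)

-- ===== LEMMAS AND PROOFS =====

-- common recursive specification: reverse each maximal segment starting at a 1
def rpSeg (xs : List Int) : List Int :=
  match xs with
  | [] => []
  | x :: r => (x :: r.takeWhile (· ≠ 1)).reverse ++ rpSeg (r.dropWhile (· ≠ 1))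
termination_by xs.length
decreasing_by
  simp only [List.length_cons]
  exact Nat.lt_succ_of_le (List.length_dropWhile_le _ r)

theorem drop_takeWhile_length (p : Int → Bool) (l : List Int) :
    l.drop (l.takeWhile p).length = l.dropWhile p := by
  induction l with
  | nil => rfl
  | cons x r ih => by_cases h : p x <;> simp [h, ih]

theorem rpFindK_spec (xs : List Int) (k : Nat) (hk : k ≤ xs.length) :
    rpFindK xs k = k + ((xs.drop k).takeWhile (· ≠ 1)).length := by
  unfold rpFindK
  by_cases hlt : k < xs.length
  · have hdrop : xs.drop k = xs[k] :: xs.drop (k + 1) := List.drop_eq_getElem_cons hlt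
    have hget : PySem.List.pyGetD xs (k : Int) 0 = xs[k] := by
      rw [PySem.List.pyGetD_natCast]
      exact List.getD_eq_getElem xs 0 hlt
    by_cases h1 : xs[k] = 1
    · simp [hlt, hget, h1, hdrop]
    · rw [if_pos ⟨hlt, by rw [hget]; exact h1⟩]
      rw [rpFindK_spec xs (k + 1) hlt, hdrop, List.takeWhile_cons]
      simp [h1]
      omega
  · have hke : k = xs.length := le_antisymm hk (not_lt.mp hlt)
    simp [hke]
termination_by xs.length - k

theorem alt_eq_rpSeg (xs : List Int) : reverse_pos_alt xs = rpSeg xs := by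
  match xs with
  | [] => rw [reverse_pos_alt]; simp [rpSeg]
  | x :: r =>
    rw [reverse_pos_alt, dif_neg (List.cons_ne_nil x r)]
    show (PySem.List.slice (x :: r) none (some ((rpFindK (x :: r) 1 : Nat) : Int))).reverse ++
        reverse_pos_alt (PySem.List.slice (x :: r) (some ((rpFindK (x :: r) 1 : Nat) : Int)) none) =
      rpSeg (x :: r)
    have hk : rpFindK (x :: r) 1 = (r.takeWhile (· ≠ 1)).length + 1 := by
      rw [rpFindK_spec (x :: r) 1 (by simp)]
      simp [Nat.add_comm]
    have htake : (x :: r).take (rpFindK (x :: r) 1) = x :: r.takeWhile (· ≠ 1) := by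
      rw [hk, List.take_succ_cons, ← List.prefix_iff_eq_take.mp (List.takeWhile_prefix _)]
    have hdrop : (x :: r).drop (rpFindK (x :: r) 1) = r.dropWhile (· ≠ 1) := by
      rw [hk, List.drop_succ_cons, drop_takeWhile_length]
    rw [PySem.List.slice_to_natCast, PySem.List.slice_from_natCast, htake, hdrop,
      alt_eq_rpSeg (r.dropWhile (· ≠ 1)), rpSeg]
termination_by xs.length
decreasing_by
  simp only [List.length_cons]
  exact Nat.lt_succ_of_le (List.length_dropWhile_le _ r)

theorem rpSeg_split (xs : List Int) :
    rpSeg xs = (xs.takeWhile (· ≠ 1)).reverse ++ rpSeg (xs.dropWhile (· ≠ 1)) := by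
  match xs with
  | [] => rfl
  | x :: r =>
    by_cases h : x = 1
    · simp [h]
    · rw [rpSeg]
      simp [h]

theorem foldA_spec (xs acc cur : List Int) :
    (xs.foldl
        (fun (s : List Int × List Int) v =>
          if v = 1 then (s.1 ++ s.2.reverse, [v]) else (s.1, s.2 ++ [v]))
        (acc, cur)).1 ++
      (xs.foldl
        (fun (s : List Int × List Int) v =>
          if v = 1 then (s.1 ++ s.2.reverse, [v]) else (s.1, s.2 ++ [v]))
        (acc, cur)).2.reverse =
    acc ++ (cur ++ xs.takeWhile (· ≠ 1)).reverse ++ rpSeg (xs.dropWhile (· ≠ 1)) := by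
  induction xs generalizing acc cur with
  | nil => simp [rpSeg]
  | cons x r ih =>
    by_cases h : x = 1
    · subst h
      rw [List.foldl_cons, if_pos rfl, ih]
      simp [rpSeg]
    · rw [List.foldl_cons, if_neg h, ih]
      simp [h]

-- ===== VERDICT (by name: the statement is the Claim_ definition above) =====
theorem reverse_pos_spec : Claim_equal_reverse_pos := by
  intro xs _
  unfold Spec_reverse_pos reverse_pos
  have hb : (PySem.List.pyRange 0 (PySem.List.len xs)).foldl
      (fun (s : List Int × List Int) i =>
        if PySem.List.pyGetD xs i 0 = 1 then
          (s.1 ++ s.2.reverse, [PySem.List.pyGetD xs i 0])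
        else
          (s.1, s.2 ++ [PySem.List.pyGetD xs i 0])) ([], []) =
      xs.foldl
        (fun (s : List Int × List Int) v =>
          if v = 1 then (s.1 ++ s.2.reverse, [v]) else (s.1, s.2 ++ [v])) ([], []) := by
    have h := PySem.List.foldl_pyRange_pyGetD xs 0
      (fun (s : List Int × List Int) v =>
        if v = 1 then (s.1 ++ s.2.reverse, [v]) else (s.1, s.2 ++ [v]))
      (([], []) : List Int × List Int) (a := 0) (le_refl 0)
    simpa using h
  simp only [hb, foldA_spec xs [] [], alt_eq_rpSeg]
  rw [rpSeg_split xs]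
  simp
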